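-- pv_equiv track=rewrite | github.com/Ewazer/simple-n-gram-model | main.py | by_gram
-- ===== SOURCE A (Python) =====
-- def clean_word(word):
--   word = word.strip('.;,-“’”:?—‘!()_').lower()
--   return word
--
-- def by_gram(text):
--   successor_map = {}
--   window = []
--
--   for line in text:
--     for word in line.split():
--       clean_word = word.strip('.;,-“’”:?—‘!()_').lower()
--       window.append(clean_word)
--
--       if len(window) == 2:
--         key = window[0]
--         value = window[1]
--         if key in successor_map:
--           successor_map[key].append(value)
--         else:
--           successor_map[key] = [value]
--         window.pop(0)
--
--   return(successor_map)
-- ===== SOURCE B (Python) =====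
-- def by_gram(text):
--   strip_set = '.;,-“’”:?—‘!()_'
--   words = []
--   for line in text:
--     for w in line.split():
--       words.append(w.strip(strip_set).lower())
--   pairs = list(zip(words, words[1:]))
--   successor_map = {}
--   for key, _ in pairs:
--     if key not in successor_map:
--       successor_map[key] = [v for k, v in pairs if k == key]
--   return successor_map
-- ===== Notes on version B (the rewrite author's own statement) =====
-- stated objective: alternative
-- what changed: B is a group-by: it materialises the flat cleaned word list and the bigram pair list, then for each key at its first occurrence builds that key's complete successor list in one scan of all pairs, instead of A's single streaming pass that grows each key's list one element at a time through a 2-word sliding window.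
import Mathlib
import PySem

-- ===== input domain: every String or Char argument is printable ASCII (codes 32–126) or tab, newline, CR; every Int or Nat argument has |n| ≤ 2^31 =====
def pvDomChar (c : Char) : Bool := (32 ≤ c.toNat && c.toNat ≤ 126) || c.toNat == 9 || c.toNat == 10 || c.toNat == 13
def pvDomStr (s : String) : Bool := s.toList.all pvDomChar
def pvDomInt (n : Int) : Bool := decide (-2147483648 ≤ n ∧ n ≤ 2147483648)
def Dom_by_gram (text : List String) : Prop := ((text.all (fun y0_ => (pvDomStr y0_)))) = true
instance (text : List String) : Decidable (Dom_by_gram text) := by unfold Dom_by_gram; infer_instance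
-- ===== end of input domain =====

-- B replaces A's streaming sliding-window pass (each key's list grown one append at a
-- time) by a group-by: flatten the cleaned words, list the bigram pairs, and build each
-- key's complete successor list in one scan of the pair list at its first occurrence;
-- objective: alternative (not faster).


-- ===== PORT A =====
-- one iteration of A's inner loop body: clean the word, append to window,
-- on len(window) == 2 record the pair and pop the window's head
def pvStepA (st : PySem.Dict String (List String) × List String) (word : String) :
    PySem.Dict String (List String) × List String :=
  let clean_word := PySem.Str.lower (PySem.Str.stripChars word ".;,-“’”:?—‘!()_")
  let window := st.2 ++ [clean_word]
  if window.length == 2 then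
    let key := (PySem.List.pyGet? window 0).getD ""    -- in range: length = 2
    let value := (PySem.List.pyGet? window 1).getD ""
    let d := if st.1.contains key
      then st.1.modify key [] (· ++ [value])           -- successor_map[key].append(value)
      else st.1.insert key [value]
    (d, window.drop 1)                                  -- window.pop(0)
  else (st.1, window)

def by_gram (text : List String) : List (String × List String) :=
  (text.foldl (fun st line => (PySem.Str.split₀ line).foldl pvStepA st)
    (PySem.Dict.empty, [])).1.items

-- ===== PORT B =====
def pvClean (w : String) : String :=
  PySem.Str.lower (PySem.Str.stripChars w ".;,-“’”:?—‘!()_")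

def by_gram_alt (text : List String) : List (String × List String) :=
  let words := text.flatMap (fun line => (PySem.Str.split₀ line).map pvClean)
  let pairs := words.zip words.tail
  -- for key, _ in pairs: if key not in map: map[key] = [v for k, v in pairs if k == key]
  (pairs.foldl (fun d q =>
      if d.contains q.1 then d
      else d.insert q.1 ((pairs.filter (fun p => p.1 == q.1)).map (·.2)))
    PySem.Dict.empty).items

-- ===== PRECONDITION & SPEC =====
def Spec_by_gram (text : List String) (out : List (String × List String)) : Prop := out = by_gram_alt text
instance (text : List String) (out : List (String × List String)) : Decidable (Spec_by_gram text out) := by unfold Spec_by_gram; infer_instance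

-- ===== CLAIM (what is proved, stated in full; the proofs are below) =====
def Claim_equal_by_gram : Prop := ∀ (text : List String), Dom_by_gram text → Spec_by_gram text (by_gram text)

-- ===== LEMMAS AND PROOFS =====

-- A's step with the cleaning factored out (acts on an already-cleaned word)
def pvStepC (st : PySem.Dict String (List String) × List String) (w : String) :
    PySem.Dict String (List String) × List String :=
  let window := st.2 ++ [w]
  if window.length == 2 then
    let key := (PySem.List.pyGet? window 0).getD ""
    let value := (PySem.List.pyGet? window 1).getD ""
    let d := if st.1.contains key
      then st.1.modify key [] (· ++ [value])
      else st.1.insert key [value]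
    (d, window.drop 1)
  else (st.1, window)

theorem pv_modify_eq (d : PySem.Dict String (List String)) (k : String) (v : String) :
    (if d.contains k then d.modify k [] (· ++ [v]) else d.insert k [v]) =
      d.modify k [] (· ++ [v]) := by
  by_cases h : d.contains k
  · simp [h]
  · simp [h, PySem.Dict.modify,
      PySem.Dict.getD_of_not_contains d [] (by simpa using h)]

-- pvStepC from a singleton window records the pair and keeps the new word
theorem pvStepC_single (d : PySem.Dict String (List String)) (p w : String) :
    pvStepC (d, [p]) w = (d.modify p [] (· ++ [w]), [w]) := by
  simp [pvStepC, PySem.List.pyGet?, PySem.List.pyIdx?, pv_modify_eq]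

-- A's fold from a singleton window is the modify-fold over the pair list; window = [last word]
theorem pv_window_run (ws : List String) (d : PySem.Dict String (List String)) (p : String) :
    ws.foldl pvStepC (d, [p]) =
      (((p :: ws).zip ws).foldl
        (fun d q => d.modify q.1 [] (· ++ [q.2])) d,
       [(p :: ws).getLast (by simp)]) := by
  induction ws generalizing d p with
  | nil => simp
  | cons w ws ih =>
    rw [List.foldl_cons, pvStepC_single, ih]
    rcases ws with _ | ⟨w', ws'⟩ <;> simp [List.zip]

-- A's nested fold over lines is the fold of pvStepC over the flattened cleaned words
theorem pv_A_flat (text : List String)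
    (st : PySem.Dict String (List String) × List String) :
    text.foldl (fun st line => (PySem.Str.split₀ line).foldl pvStepA st) st =
    (text.flatMap (fun line => (PySem.Str.split₀ line).map pvClean)).foldl pvStepC st := by
  induction text generalizing st with
  | nil => rfl
  | cons l t ih =>
    rw [List.foldl_cons, List.flatMap_cons, List.foldl_append, ih, List.foldl_map]
    rfl

-- B's group-by fold, characterised: keys in first-occurrence order, every present key
-- already holding its final value vals k
theorem pv_B_run (vals : String → List String) (l : List (String × String))
    (d : PySem.Dict String (List String)) (hnd : d.keys.Nodup)
    (hinv : ∀ k, d.contains k = true → d.getD k [] = vals k) :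
    let F := l.foldl (fun d q => if d.contains q.1 then d else d.insert q.1 (vals q.1)) d
    F.keys = PySem.Set.update d.keys (l.map (·.1)) ∧ F.keys.Nodup ∧
      ∀ k, F.contains k = true → F.getD k [] = vals k := by
  induction l generalizing d with
  | nil =>
    refine ⟨?_, hnd, hinv⟩
    simp [PySem.Set.update]
  | cons q l ih =>
    by_cases h : d.contains q.1 = true
    · have hmem : q.1 ∈ d.keys := (PySem.Dict.contains_iff_mem_keys _ _).1 h
      have := ih d hnd hinv
      simpa [h, PySem.Set.update_cons, PySem.Set.add_of_mem hmem] using this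
    · have hnd' : (d.insert q.1 (vals q.1)).keys.Nodup := PySem.Dict.nodup_keys_insert _ _ _ hnd
      have hinv' : ∀ k, (d.insert q.1 (vals q.1)).contains k = true →
          (d.insert q.1 (vals q.1)).getD k [] = vals k := by
        intro k hk
        rcases eq_or_ne k q.1 with rfl | hne
        · simp [PySem.Dict.getD_insert_self]
        · rw [PySem.Dict.getD_insert_of_ne _ _ _ hne]
          apply hinv
          rw [PySem.Dict.contains_insert] at hk
          simpa [hne] using hk
      have := ih (d.insert q.1 (vals q.1)) hnd' hinv'
      have hkeys : (d.insert q.1 (vals q.1)).keys = d.keys ++ [q.1] :=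
        PySem.Dict.keys_insert_of_not_contains d _ (by simpa using h)
      have hadd : PySem.Set.add d.keys q.1 = d.keys ++ [q.1] :=
        PySem.Set.add_of_not_mem (fun hm => h ((PySem.Dict.contains_iff_mem_keys _ _).2 hm))
      simpa [h, PySem.Set.update_cons, hadd, hkeys] using this

-- the modify-fold and B's group-by fold over the same pair list have equal items
theorem pv_folds_items (ps : List (String × String)) :
    (ps.foldl (fun d p => d.modify p.1 [] (· ++ [p.2])) PySem.Dict.empty).items =
    (ps.foldl (fun d q => if d.contains q.1 then d
        else d.insert q.1 ((ps.filter (fun p => p.1 == q.1)).map (·.2)))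
      PySem.Dict.empty).items := by
  set vals : String → List String := fun k => (ps.filter (fun p => p.1 == k)).map (·.2) with hvals
  set A := ps.foldl (fun d p => d.modify p.1 [] (· ++ [p.2])) PySem.Dict.empty with hA
  set B := ps.foldl (fun d q => if d.contains q.1 then d else d.insert q.1 (vals q.1))
      PySem.Dict.empty with hB
  have hAkeys : A.keys = PySem.Set.update [] (ps.map (·.1)) := by
    rw [hA]
    have := PySem.Dict.keys_foldl_modify_key ps (·.1) [] (fun d p => (· ++ [p.2]))
      (PySem.Dict.empty : PySem.Dict String (List String))
    simpa using this
  have hAnd : A.keys.Nodup := by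
    rw [hA]
    exact PySem.Dict.nodup_keys_foldl_modify_key ps (·.1) [] (fun d p => (· ++ [p.2])) _
      PySem.Dict.nodup_keys_empty
  have hAgetD : ∀ k, A.getD k [] = vals k := by
    intro k
    rw [hA, PySem.Dict.getD_foldl_modify_append]
    simp [hvals]
  have hBfacts := pv_B_run vals ps PySem.Dict.empty (by simp) (by simp)
  rw [← hB] at hBfacts
  obtain ⟨hBkeys, hBnd, hBgetD⟩ := hBfacts
  have hkeys : A.keys = B.keys := by rw [hAkeys, hBkeys, PySem.Dict.keys_empty]
  rw [PySem.Dict.items_eq_map_keys A hAnd [], PySem.Dict.items_eq_map_keys B hBnd [], hkeys]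
  apply List.map_congr_left
  intro k hk
  have hc : B.contains k = true := (PySem.Dict.contains_iff_mem_keys _ _).2 hk
  rw [hAgetD k, hBgetD k hc]

theorem pv_main (text : List String) : by_gram text = by_gram_alt text := by
  unfold by_gram by_gram_alt
  rw [pv_A_flat]
  cases h : text.flatMap (fun line => (PySem.Str.split₀ line).map pvClean) with
  | nil => rfl
  | cons p ws =>
    rw [List.foldl_cons]
    have h0 : pvStepC (PySem.Dict.empty, []) p = (PySem.Dict.empty, [p]) := by
      simp [pvStepC]
    rw [h0, pv_window_run]
    simpa using pv_folds_items ((p :: ws).zip ws)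

-- ===== VERDICT (by name: the statement is the Claim_ definition above) =====
theorem by_gram_spec : Claim_equal_by_gram := by
  intro text _
  exact pv_main text
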